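-- pv_equiv track=rewrite | github.com/RBVI/ChimeraX | src/tools/struts/struts.py | short_connection
-- ===== SOURCE A (Python) =====
-- def short_connection(i1, i2, dmax, strut_connections):
--
--     adist = {i1:0}
--     bndry = set((i1,))
--     sc = strut_connections
--     while bndry:
--         i = bndry.pop()
--         d = adist[i]
--         acon = sc.get(i,[])
--         for n,dc in acon:
--             dn = d + dc
--             if dn <= dmax:
--                 if n == i2:
--                     return True
--                 if not n in adist or dn < adist[n]:
--                     adist[n] = dn
--                     bndry.add(n)
--     return False
-- ===== SOURCE B (Python) =====
-- def short_connection(i1, i2, dmax, strut_connections):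
--     # Bellman-Ford style: sweep all edges until the distance map stabilises,
--     # then scan the edges into i2 once.  (A instead drives a worklist set.)
--     sc = strut_connections
--     dist = {i1: 0}
--     changed = True
--     while changed:
--         changed = False
--         for u in sc:
--             if u in dist:
--                 du = dist[u]
--                 for n, dc in sc[u]:
--                     dn = du + dc
--                     if n != i2 and dn <= dmax and (n not in dist or dn < dist[n]):
--                         dist[n] = dn
--                         changed = True
--     return any(u in dist and dist[u] + dc <= dmax
--                for u in sc for n, dc in sc[u] if n == i2)
-- ===== Notes on version B (the rewrite author's own statement) =====
-- stated objective: alternative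
-- what changed: A drives a worklist set (label-correcting: pop a boundary node, relax its edges, re-queue improved nodes, early-return on i2); B instead runs global Bellman-Ford sweeps over all dict entries until the distance map stabilises and then checks the edges into i2 in one separate final scan. Pre_ excludes negative edge weights, on which A can relax a reachable negative cycle forever and never return (strut weights are interatomic distances, naturally nonnegative).
-- outside the precondition, e.g. on short_connection(0, 1, 0, {0: [(1, -5)]}): A returns True, B returns True
import Mathlib
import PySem

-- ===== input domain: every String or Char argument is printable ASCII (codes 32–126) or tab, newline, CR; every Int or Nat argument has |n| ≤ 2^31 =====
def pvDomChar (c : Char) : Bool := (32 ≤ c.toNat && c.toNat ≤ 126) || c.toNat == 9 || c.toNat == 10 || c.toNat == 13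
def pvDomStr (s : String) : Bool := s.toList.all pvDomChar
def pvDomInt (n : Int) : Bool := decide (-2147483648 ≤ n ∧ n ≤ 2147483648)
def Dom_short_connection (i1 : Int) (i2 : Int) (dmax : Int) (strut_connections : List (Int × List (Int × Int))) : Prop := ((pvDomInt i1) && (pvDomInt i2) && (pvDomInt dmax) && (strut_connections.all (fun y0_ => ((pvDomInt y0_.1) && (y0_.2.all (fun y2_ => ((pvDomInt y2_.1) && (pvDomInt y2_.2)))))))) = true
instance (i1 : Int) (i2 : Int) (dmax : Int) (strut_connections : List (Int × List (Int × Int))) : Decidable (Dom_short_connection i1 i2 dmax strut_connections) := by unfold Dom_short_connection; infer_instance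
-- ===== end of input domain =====

-- B re-implements A's worklist reachability search as Bellman-Ford sweeps to a
-- fixpoint plus one final scan of the edges into i2 (alternative algorithm,
-- same asymptotic cost); equality is proved on nonnegative edge weights (Pre_).

-- ===== PORT A =====
-- Fuel helpers (fuel only makes the 'while' recursion total; it is proved
-- sufficient under Pre_, so the 0-fuel branch is never taken there):
-- every node id that can ever become a key of adist, and a fuel bound.
def pvNodes (i1 : Int) (scl : List (Int × List (Int × Int))) : List Int :=
  PySem.Set.ofList (i1 :: scl.flatMap (fun p => p.2.map Prod.fst))

def pvFuelA (i1 : Int) (dmax : Int) (scl : List (Int × List (Int × Int))) : Nat :=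
  let K := (pvNodes i1 scl).length
  K * ((max dmax 0).toNat + 1) * (K + 2) + K + 1

-- inner 'for n, dc in acon' loop of A; 'none' = Python's 'return True'
def pvRelaxA (i2 : Int) (dmax : Int) (d : Int) :
    List (Int × Int) → PySem.Dict Int Int → PySem.Set Int →
    Option (PySem.Dict Int Int × PySem.Set Int)
  | [], adist, bndry => some (adist, bndry)
  | (n, dc) :: rest, adist, bndry =>
    let dn := d + dc
    if dn ≤ dmax then
      if n = i2 then none        -- 'return True'
      else
        -- 'not n in adist or dn < adist[n]' (short-circuit)
        let upd : Bool := match adist.get? n with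
          | none => true
          | some dv => decide (dn < dv)
        if upd then pvRelaxA i2 dmax d rest (adist.insert n dn) (PySem.Set.add bndry n)
        else pvRelaxA i2 dmax d rest adist bndry
    else pvRelaxA i2 dmax d rest adist bndry

-- 'while bndry:' loop; Python set.pop() removes an arbitrary element — ported
-- as the head of the Set's element list.
def pvLoopA (i2 : Int) (dmax : Int) (sc : PySem.Dict Int (List (Int × Int))) :
    Nat → PySem.Dict Int Int → PySem.Set Int → Bool
  | 0, _, _ => false
  | fuel + 1, adist, bndry =>
    match bndry with
    | [] => false
    | i :: rest =>
      let d := (adist.get? i).getD 0   -- 'adist[i]'; i is always a key of adist here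
      match pvRelaxA i2 dmax d (sc.getD i []) adist rest with
      | none => true
      | some (adist', bndry') => pvLoopA i2 dmax sc fuel adist' bndry'

def short_connection (i1 : Int) (i2 : Int) (dmax : Int) (strut_connections : List (Int × List (Int × Int))) : Bool :=
  pvLoopA i2 dmax (PySem.Dict.mk strut_connections) (pvFuelA i1 dmax strut_connections)
    (PySem.Dict.mk [(i1, 0)]) [i1]

-- ===== PORT B =====
def pvFuelB (i1 : Int) (dmax : Int) (scl : List (Int × List (Int × Int))) : Nat :=
  (1 + (scl.flatMap (fun p => p.2.map Prod.fst)).length) * ((max dmax 0).toNat + 1) + 1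

-- inner 'for n, dc in sc[u]' loop of B
def pvRelaxB (i2 : Int) (dmax : Int) (du : Int) :
    List (Int × Int) → PySem.Dict Int Int → Bool → PySem.Dict Int Int × Bool
  | [], dist, changed => (dist, changed)
  | (n, dc) :: rest, dist, changed =>
    let dn := du + dc
    let upd : Bool :=
      if n ≠ i2 ∧ dn ≤ dmax then
        match dist.get? n with
        | none => true
        | some dv => decide (dn < dv)
      else false
    if upd then pvRelaxB i2 dmax du rest (dist.insert n dn) true
    else pvRelaxB i2 dmax du rest dist changed

-- one 'for u in sc:' sweep of B
def pvSweepB (i2 : Int) (dmax : Int) (sc : PySem.Dict Int (List (Int × Int))) :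
    List Int → PySem.Dict Int Int → Bool → PySem.Dict Int Int × Bool
  | [], dist, changed => (dist, changed)
  | u :: rest, dist, changed =>
    match dist.get? u with
    | none => pvSweepB i2 dmax sc rest dist changed
    | some du =>
      let r := pvRelaxB i2 dmax du (sc.getD u []) dist changed
      pvSweepB i2 dmax sc rest r.1 r.2

-- 'while changed:' loop of B (fuel only makes the recursion total)
def pvSweepsB (i2 : Int) (dmax : Int) (sc : PySem.Dict Int (List (Int × Int))) (keys : List Int) :
    Nat → PySem.Dict Int Int → PySem.Dict Int Int
  | 0, dist => dist
  | fuel + 1, dist =>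
    let r := pvSweepB i2 dmax sc keys dist false
    if r.2 then pvSweepsB i2 dmax sc keys fuel r.1 else r.1

def short_connection_alt (i1 : Int) (i2 : Int) (dmax : Int) (strut_connections : List (Int × List (Int × Int))) : Bool :=
  let sc := PySem.Dict.mk strut_connections
  let keys := strut_connections.map Prod.fst
  let dist := pvSweepsB i2 dmax sc keys (pvFuelB i1 dmax strut_connections) (PySem.Dict.mk [(i1, 0)])
  keys.any (fun u => (sc.getD u []).any (fun e =>
    e.1 == i2 && (match dist.get? u with
                  | none => false
                  | some du => decide (du + e.2 ≤ dmax))))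

-- ===== PRECONDITION & SPEC =====
-- Pre_ excludes negative edge weights: strut weights are distances (naturally
-- nonnegative), and on a reachable negative cycle A relaxes forever and never
-- returns (on the negative-weight inputs where A does return, B agrees where
-- we checked, but the equality is only claimed on nonnegative weights).
def Pre_short_connection (i1 : Int) (i2 : Int) (dmax : Int) (strut_connections : List (Int × List (Int × Int))) : Prop :=
  ∀ p ∈ strut_connections, ∀ e ∈ p.2, (0 : Int) ≤ e.2
instance (i1 : Int) (i2 : Int) (dmax : Int) (strut_connections : List (Int × List (Int × Int))) : Decidable (Pre_short_connection i1 i2 dmax strut_connections) := by unfold Pre_short_connection; infer_instance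

def pvWitness_short_connection : Int × Int × Int × (List (Int × List (Int × Int))) :=
  (0, 2, 10, [(0, [(1, 4)]), (1, [(2, 5)])])

def Spec_short_connection (i1 : Int) (i2 : Int) (dmax : Int) (strut_connections : List (Int × List (Int × Int))) (out : Bool) : Prop := out = short_connection_alt i1 i2 dmax strut_connections
instance (i1 : Int) (i2 : Int) (dmax : Int) (strut_connections : List (Int × List (Int × Int))) (out : Bool) : Decidable (Spec_short_connection i1 i2 dmax strut_connections out) := by unfold Spec_short_connection; infer_instance

-- ===== CLAIM (what is proved, stated in full; the proofs are below) =====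
def Claim_equal_short_connection : Prop := ∀ (i1 : Int) (i2 : Int) (dmax : Int) (strut_connections : List (Int × List (Int × Int))), Dom_short_connection i1 i2 dmax strut_connections → Pre_short_connection i1 i2 dmax strut_connections → Spec_short_connection i1 i2 dmax strut_connections (short_connection i1 i2 dmax strut_connections)

-- ===== LEMMAS AND PROOFS =====

-- edges leaving u ('sc.get(u, [])' / 'sc[u]')
def pvE (scl : List (Int × List (Int × Int))) (u : Int) : List (Int × Int) :=
  (PySem.Dict.mk scl).getD u []

-- paths i1 → n that A/B explore: ≥ 0 edges, never entering i2, every prefix ≤ dmax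
inductive pvPath (i1 i2 dmax : Int) (scl : List (Int × List (Int × Int))) : Int → Int → Prop
  | start : pvPath i1 i2 dmax scl i1 0
  | step {u d n dc} : pvPath i1 i2 dmax scl u d → (n, dc) ∈ pvE scl u → n ≠ i2 →
      d + dc ≤ dmax → pvPath i1 i2 dmax scl n (d + dc)

-- what both programs decide: an edge into i2 reachable within dmax
def pvHit (i1 i2 dmax : Int) (scl : List (Int × List (Int × Int))) : Prop :=
  ∃ u d dc, pvPath i1 i2 dmax scl u d ∧ (i2, dc) ∈ pvE scl u ∧ d + dc ≤ dmax

def pvW (scl : List (Int × List (Int × Int))) : Prop :=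
  ∀ u e, e ∈ pvE scl u → (0 : Int) ≤ e.2

-- dict invariants shared by both searches
def pvSound (i1 i2 dmax : Int) (scl : List (Int × List (Int × Int))) (ad : PySem.Dict Int Int) : Prop :=
  ∀ n d, ad.get? n = some d → pvPath i1 i2 dmax scl n d
def pvUB (dmax : Int) (ad : PySem.Dict Int Int) : Prop :=
  ∀ n d, ad.get? n = some d → d ≤ max dmax 0
def pvKeysN (i1 : Int) (scl : List (Int × List (Int × Int))) (ad : PySem.Dict Int Int) : Prop :=
  ∀ n, (ad.get? n).isSome = true → n ∈ pvNodes i1 scl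
def pvI1 (i1 : Int) (ad : PySem.Dict Int Int) : Prop :=
  ∃ d, ad.get? i1 = some d ∧ d ≤ 0
-- "u's edges are fully relaxed" (weak form, shared by A's and B's fixpoints)
def pvFixW (i2 dmax : Int) (scl : List (Int × List (Int × Int))) (ad : PySem.Dict Int Int) : Prop :=
  ∀ u du, ad.get? u = some du → ∀ n dc, (n, dc) ∈ pvE scl u → n ≠ i2 → du + dc ≤ dmax →
    ∃ dv, ad.get? n = some dv ∧ dv ≤ du + dc
-- A's invariant: every non-boundary key is fully relaxed, and no relaxed key
-- has an edge into i2 within dmax (else A would already have returned True)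
def pvFixA (i2 dmax : Int) (scl : List (Int × List (Int × Int))) (ad : PySem.Dict Int Int) (bd : List Int) : Prop :=
  ∀ u du, ad.get? u = some du → u ∉ bd → ∀ n dc, (n, dc) ∈ pvE scl u → du + dc ≤ dmax →
    n ≠ i2 ∧ ∃ dv, ad.get? n = some dv ∧ dv ≤ du + dc

-- termination potential
def pvVal (dmax : Int) (ad : PySem.Dict Int Int) (n : Int) : Nat :=
  ((ad.get? n).getD (max dmax 0 + 1)).toNat
def pvPhi (i1 dmax : Int) (scl : List (Int × List (Int × Int))) (ad : PySem.Dict Int Int) : Nat :=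
  ((pvNodes i1 scl).map (pvVal dmax ad)).sum
def pvMeas (i1 dmax : Int) (scl : List (Int × List (Int × Int))) (ad : PySem.Dict Int Int) (bd : List Int) : Nat :=
  pvPhi i1 dmax scl ad * ((pvNodes i1 scl).length + 2) + bd.length

lemma pv_get?_mk_mem {ν : Type} (l : List (Int × ν)) (u : Int) (v : ν)
    (h : (PySem.Dict.mk l).get? u = some v) : (u, v) ∈ l := by
  induction l with
  | nil => simp [PySem.Dict.get?] at h
  | cons p rest ih =>
    obtain ⟨k, w⟩ := p
    rw [PySem.Dict.get?_mk_cons] at h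
    by_cases hk : k = u
    · subst hk; simp at h; simp [h]
    · simp [hk] at h; exact List.mem_cons_of_mem _ (ih h)

lemma pvW_of_pre (i1 i2 dmax : Int) (scl : List (Int × List (Int × Int)))
    (hP : Pre_short_connection i1 i2 dmax scl) : pvW scl := by
  intro u e he
  unfold pvE PySem.Dict.getD at he
  cases hg : (PySem.Dict.mk scl).get? u with
  | none => rw [hg] at he; simp at he
  | some es =>
    rw [hg] at he
    exact hP _ (pv_get?_mk_mem scl u es hg) e he

lemma pv_target_mem_nodes (i1 : Int) (scl : List (Int × List (Int × Int))) (u n dc : Int)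
    (h : (n, dc) ∈ pvE scl u) : n ∈ pvNodes i1 scl := by
  unfold pvNodes
  rw [PySem.Set.mem_ofList]
  right
  unfold pvE PySem.Dict.getD at h
  cases hg : (PySem.Dict.mk scl).get? u with
  | none => rw [hg] at h; simp at h
  | some es =>
    rw [hg] at h
    have hm := pv_get?_mk_mem scl u es hg
    exact List.mem_flatMap.mpr ⟨(u, es), hm, List.mem_map.mpr ⟨(n, dc), h, rfl⟩⟩

lemma pv_src_mem_keys (scl : List (Int × List (Int × Int))) (u n dc : Int)
    (h : (n, dc) ∈ pvE scl u) : u ∈ scl.map Prod.fst := by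
  unfold pvE PySem.Dict.getD at h
  cases hg : (PySem.Dict.mk scl).get? u with
  | none => rw [hg] at h; simp at h
  | some es =>
    exact List.mem_map.mpr ⟨(u, es), pv_get?_mk_mem scl u es hg, rfl⟩

lemma pvPath_nonneg (i1 i2 dmax : Int) (scl : List (Int × List (Int × Int)))
    (hW : pvW scl) {n d : Int} (h : pvPath i1 i2 dmax scl n d) : 0 ≤ d := by
  induction h with
  | start => exact le_refl 0
  | @step u d' n' dc hp he hne hle ih => have := hW u (n', dc) he; simp at this; omega

lemma pv_dominate (i1 i2 dmax : Int) (scl : List (Int × List (Int × Int)))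
    (ad : PySem.Dict Int Int) (hI : pvI1 i1 ad) (hF : pvFixW i2 dmax scl ad)
    {n d : Int} (h : pvPath i1 i2 dmax scl n d) :
    ∃ dv, ad.get? n = some dv ∧ dv ≤ d := by
  induction h with
  | start => obtain ⟨d0, h0, hle⟩ := hI; exact ⟨d0, h0, hle⟩
  | @step u d' n' dc hp he hne hle ih =>
    obtain ⟨dv, hdv, hdvle⟩ := ih
    obtain ⟨dw, hdw, hdwle⟩ := hF u dv hdv n' dc he hne (by omega)
    exact ⟨dw, hdw, by omega⟩

lemma pv_noHit_of_fixA (i1 i2 dmax : Int) (scl : List (Int × List (Int × Int)))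
    (ad : PySem.Dict Int Int) (hI : pvI1 i1 ad)
    (hF : pvFixA i2 dmax scl ad []) : ¬ pvHit i1 i2 dmax scl := by
  rintro ⟨u, d, dc, hp, he, hle⟩
  have hFW : pvFixW i2 dmax scl ad := by
    intro u' du' hdu' n dc' he' hne' hle'
    exact (hF u' du' hdu' (List.not_mem_nil) n dc' he' hle').2
  obtain ⟨dv, hdv, hdvle⟩ := pv_dominate i1 i2 dmax scl ad hI hFW hp
  exact (hF u dv hdv (List.not_mem_nil) i2 dc he (by omega)).1 rfl

lemma pv_sum_le_sum (l : List Int) (f g : Int → Nat)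
    (hle : ∀ x ∈ l, f x ≤ g x) : (l.map f).sum ≤ (l.map g).sum := by
  induction l with
  | nil => simp
  | cons a t ih =>
    simp only [List.map_cons, List.sum_cons]
    have h1 := hle a List.mem_cons_self
    have h2 := ih (fun x hx => hle x (List.mem_cons_of_mem _ hx))
    omega

lemma pvPhi_le (i1 dmax : Int) (scl : List (Int × List (Int × Int)))
    (ad : PySem.Dict Int Int) (hub : pvUB dmax ad) :
    pvPhi i1 dmax scl ad ≤ (pvNodes i1 scl).length * ((max dmax 0).toNat + 1) := by
  unfold pvPhi
  have h : ((pvNodes i1 scl).map (pvVal dmax ad)).sum ≤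
      ((pvNodes i1 scl).map (fun _ => (max dmax 0).toNat + 1)).sum := by
    apply pv_sum_le_sum
    intro n _
    unfold pvVal
    cases hg : ad.get? n with
    | none => simp only [Option.getD_none]; omega
    | some d => have := hub n d hg; simp only [Option.getD_some]; omega
  calc ((pvNodes i1 scl).map (pvVal dmax ad)).sum ≤ _ := h
    _ = (pvNodes i1 scl).length * ((max dmax 0).toNat + 1) := by
        rw [List.map_const', List.sum_replicate, smul_eq_mul]

lemma pv_sum_lt_sum (l : List Int) (f g : Int → Nat)
    (hle : ∀ x ∈ l, f x ≤ g x) (x0 : Int) (hx0 : x0 ∈ l) (hlt : f x0 < g x0) :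
    (l.map f).sum < (l.map g).sum := by
  induction l with
  | nil => simp at hx0
  | cons a t ih =>
    simp only [List.map_cons, List.sum_cons]
    have htle : (t.map f).sum ≤ (t.map g).sum :=
      pv_sum_le_sum t f g (fun x hx => hle x (List.mem_cons_of_mem _ hx))
    rcases List.mem_cons.mp hx0 with h | h
    · subst h; omega
    · have hale : f a ≤ g a := hle a List.mem_cons_self
      have := ih (fun x hx => hle x (List.mem_cons_of_mem _ hx)) h
      omega


lemma pv_phi_insert_lt (i1 dmax : Int) (scl : List (Int × List (Int × Int)))
    (ad : PySem.Dict Int Int) (n dn : Int) (hn : n ∈ pvNodes i1 scl) (h0 : 0 ≤ dn)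
    (hlt : dn < (ad.get? n).getD (max dmax 0 + 1)) :
    pvPhi i1 dmax scl (ad.insert n dn) < pvPhi i1 dmax scl ad := by
  unfold pvPhi
  refine pv_sum_lt_sum _ _ _ ?_ n hn ?_
  · intro m _
    unfold pvVal
    rw [PySem.Dict.get?_insert]
    by_cases hm : m = n
    · subst hm; rw [if_pos rfl]; simp only [Option.getD_some]; omega
    · rw [if_neg hm]
  · unfold pvVal
    rw [PySem.Dict.get?_insert, if_pos rfl]
    simp only [Option.getD_some]
    omega

lemma pvRelaxA_none (i2 dmax d : Int) :
    ∀ (edges : List (Int × Int)) (ad : PySem.Dict Int Int) (bd : PySem.Set Int),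
    pvRelaxA i2 dmax d edges ad bd = none →
    ∃ dc, (i2, dc) ∈ edges ∧ d + dc ≤ dmax := by
  intro edges
  induction edges with
  | nil => intro ad bd h; simp [pvRelaxA] at h
  | cons e rest ih =>
    intro ad bd h
    obtain ⟨n, dc⟩ := e
    simp only [pvRelaxA] at h
    by_cases h1 : d + dc ≤ dmax
    · rw [if_pos h1] at h
      by_cases h2 : n = i2
      · exact ⟨dc, by simp [h2], h1⟩
      · rw [if_neg h2] at h
        split at h <;> (try split at h) <;>
          (obtain ⟨dc', hm, hle⟩ := ih _ _ h; exact ⟨dc', List.mem_cons_of_mem _ hm, hle⟩)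
    · rw [if_neg h1] at h
      obtain ⟨dc', hm, hle⟩ := ih _ _ h
      exact ⟨dc', List.mem_cons_of_mem _ hm, hle⟩

structure pvRelaxPostA (i1 i2 dmax : Int) (scl : List (Int × List (Int × Int))) (i d : Int)
    (edges : List (Int × Int)) (ad ad' : PySem.Dict Int Int) (bd bd' : List Int) : Prop where
  sound' : pvSound i1 i2 dmax scl ad'
  ub' : pvUB dmax ad'
  keysN' : pvKeysN i1 scl ad'
  bdKeys' : ∀ n ∈ bd', (ad'.get? n).isSome = true
  nodup' : bd'.Nodup
  mono : ∀ m dm, ad.get? m = some dm → ∃ dm', ad'.get? m = some dm' ∧ dm' ≤ dm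
  sup : ∀ m ∈ bd, m ∈ bd'
  unchanged : ∀ m, m ∉ bd' → ad'.get? m = ad.get? m
  ival : ad'.get? i = some d
  inot : i ∉ bd'
  processed : ∀ n dc, (n, dc) ∈ edges → d + dc ≤ dmax →
    n ≠ i2 ∧ ∃ dv, ad'.get? n = some dv ∧ dv ≤ d + dc
  phi : (ad' = ad ∧ bd' = bd) ∨ pvPhi i1 dmax scl ad' < pvPhi i1 dmax scl ad

lemma pvRelaxA_post (i1 i2 dmax : Int) (scl : List (Int × List (Int × Int))) (i d : Int)
    (hW : pvW scl) (hd0 : 0 ≤ d) (hPd : pvPath i1 i2 dmax scl i d) :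
    ∀ (edges : List (Int × Int)) (ad : PySem.Dict Int Int) (bd : List Int),
    (∀ e ∈ edges, e ∈ pvE scl i) →
    pvSound i1 i2 dmax scl ad → pvUB dmax ad → pvKeysN i1 scl ad →
    (∀ n ∈ bd, (ad.get? n).isSome = true) → bd.Nodup →
    ad.get? i = some d → i ∉ bd →
    ∀ ad' bd', pvRelaxA i2 dmax d edges ad bd = some (ad', bd') →
    pvRelaxPostA i1 i2 dmax scl i d edges ad ad' bd bd' := by
  intro edges
  induction edges with
  | nil =>
    intro ad bd _ hs hub hk hbk hnd hi hibd ad' bd' h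
    simp only [pvRelaxA, Option.some.injEq, Prod.mk.injEq] at h
    obtain ⟨rfl, rfl⟩ := h
    exact ⟨hs, hub, hk, hbk, hnd, fun m dm hm => ⟨dm, hm, le_refl _⟩, fun m hm => hm,
      fun m _ => rfl, hi, hibd, by simp, Or.inl ⟨rfl, rfl⟩⟩
  | cons e rest ih =>
    intro ad bd hsub hs hub hk hbk hnd hi hibd ad' bd' h
    obtain ⟨n, dc⟩ := e
    have hedge : (n, dc) ∈ pvE scl i := hsub _ List.mem_cons_self
    have hdc : (0:Int) ≤ dc := by have := hW i (n, dc) hedge; simpa using this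
    have hsubr : ∀ e ∈ rest, e ∈ pvE scl i := fun e he => hsub e (List.mem_cons_of_mem _ he)
    simp only [pvRelaxA] at h
    by_cases h1 : d + dc ≤ dmax
    · rw [if_pos h1] at h
      by_cases h2 : n = i2
      · rw [if_pos h2] at h; exact absurd h (by simp)
      · rw [if_neg h2] at h
        -- whether the update fires
        have hmain : ∀ (hupd : (match ad.get? n with
              | none => true
              | some dv => decide (d + dc < dv)) = true),
            pvRelaxPostA i1 i2 dmax scl i d ((n, dc) :: rest) ad ad' bd bd' := by
          intro hupd
          rw [if_pos hupd] at h
          -- n ≠ i : updating i itself would need dc < 0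
          have hni : n ≠ i := by
            intro hrfl
            subst hrfl
            rw [hi] at hupd
            simp at hupd
            omega
          have hlt : d + dc < (ad.get? n).getD (max dmax 0 + 1) := by
            cases hg : ad.get? n with
            | none => simp only [Option.getD_none]; omega
            | some dv => rw [hg] at hupd; simp at hupd; simpa using hupd
          have hs2 : pvSound i1 i2 dmax scl (ad.insert n (d + dc)) := by
            intro m dm hm
            rw [PySem.Dict.get?_insert] at hm
            by_cases hmn : m = n
            · rw [if_pos hmn] at hm
              obtain rfl := Option.some.injEq .. ▸ hm
              cases hm
              exact hmn ▸ pvPath.step hPd hedge h2 h1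
            · rw [if_neg hmn] at hm; exact hs m dm hm
          have hub2 : pvUB dmax (ad.insert n (d + dc)) := by
            intro m dm hm
            rw [PySem.Dict.get?_insert] at hm
            by_cases hmn : m = n
            · rw [if_pos hmn] at hm; cases hm; omega
            · rw [if_neg hmn] at hm; exact hub m dm hm
          have hk2 : pvKeysN i1 scl (ad.insert n (d + dc)) := by
            intro m hm
            rw [PySem.Dict.get?_insert] at hm
            by_cases hmn : m = n
            · exact hmn ▸ pv_target_mem_nodes i1 scl i n dc hedge
            · rw [if_neg hmn] at hm; exact hk m hm
          have hbk2 : ∀ m ∈ PySem.Set.add bd n, ((ad.insert n (d + dc)).get? m).isSome = true := by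
            intro m hm
            rw [PySem.Dict.get?_insert]
            by_cases hmn : m = n
            · simp [hmn]
            · rw [if_neg hmn]
              rcases (PySem.Set.mem_add bd n m).mp hm with h' | h'
              · exact hbk m h'
              · exact absurd h' hmn
          have hi2 : (ad.insert n (d + dc)).get? i = some d := by
            rw [PySem.Dict.get?_insert, if_neg (fun hh => hni hh.symm)]
            exact hi
          have hibd2 : i ∉ PySem.Set.add bd n := by
            intro hmem
            rcases (PySem.Set.mem_add bd n i).mp hmem with h' | h'
            · exact hibd h'
            · exact hni h'.symm
          have post := ih (ad.insert n (d + dc)) (PySem.Set.add bd n) hsubr hs2 hub2 hk2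
            hbk2 (PySem.Set.nodup_add bd n hnd) hi2 hibd2 ad' bd' h
          have hnbd' : n ∈ bd' :=
            post.sup n ((PySem.Set.mem_add bd n n).mpr (Or.inr rfl))
          have hphi2 : pvPhi i1 dmax scl (ad.insert n (d + dc)) < pvPhi i1 dmax scl ad :=
            pv_phi_insert_lt i1 dmax scl ad n (d + dc)
              (pv_target_mem_nodes i1 scl i n dc hedge) (by omega) hlt
          refine ⟨post.sound', post.ub', post.keysN', post.bdKeys', post.nodup', ?_, ?_, ?_,
            post.ival, post.inot, ?_, ?_⟩
          · -- mono
            intro m dm hm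
            by_cases hmn : m = n
            · subst hmn
              have hdm : d + dc < dm := by rw [hm] at hlt; simpa using hlt
              obtain ⟨dm', hm', hle'⟩ := post.mono m (d + dc)
                (by rw [PySem.Dict.get?_insert, if_pos rfl])
              exact ⟨dm', hm', by omega⟩
            · exact post.mono m dm (by rw [PySem.Dict.get?_insert, if_neg hmn]; exact hm)
          · -- sup
            intro m hm
            exact post.sup m ((PySem.Set.mem_add bd n m).mpr (Or.inl hm))
          · -- unchanged
            intro m hm
            have hmn : m ≠ n := fun hh => hm (hh ▸ hnbd')
            rw [post.unchanged m hm, PySem.Dict.get?_insert, if_neg hmn]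
          · -- processed
            intro n' dc' hmem hle
            rcases List.mem_cons.mp hmem with h' | h'
            · obtain ⟨rfl, rfl⟩ := Prod.mk.injEq .. ▸ h'
              refine ⟨h2, ?_⟩
              obtain ⟨dv, hv, hvle⟩ := post.mono n' (d + dc')
                (by rw [PySem.Dict.get?_insert, if_pos rfl])
              exact ⟨dv, hv, hvle⟩
            · exact post.processed n' dc' h' hle
          · -- phi
            right
            rcases post.phi with ⟨heq, _⟩ | hlt'
            · rw [heq]; exact hphi2
            · omega
        have hskip : ∀ (hupd : (match ad.get? n with
              | none => true
              | some dv => decide (d + dc < dv)) = false),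
            pvRelaxPostA i1 i2 dmax scl i d ((n, dc) :: rest) ad ad' bd bd' := by
          intro hupd
          rw [if_neg (by simp [hupd])] at h
          have post := ih ad bd hsubr hs hub hk hbk hnd hi hibd ad' bd' h
          refine ⟨post.sound', post.ub', post.keysN', post.bdKeys', post.nodup', post.mono,
            post.sup, post.unchanged, post.ival, post.inot, ?_, post.phi⟩
          intro n' dc' hmem hle
          rcases List.mem_cons.mp hmem with h' | h'
          · obtain ⟨rfl, rfl⟩ := Prod.mk.injEq .. ▸ h'
            refine ⟨h2, ?_⟩
            cases hg : ad.get? n' with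
            | none => rw [hg] at hupd; simp at hupd
            | some dv =>
              rw [hg] at hupd
              have hge : dv ≤ d + dc' := by simpa using hupd
              obtain ⟨dv', hv', hle'⟩ := post.mono n' dv hg
              exact ⟨dv', hv', by omega⟩
          · exact post.processed n' dc' h' hle
        cases hupd : (match ad.get? n with
            | none => true
            | some dv => decide (d + dc < dv)) with
        | true => exact hmain hupd
        | false => exact hskip hupd
    · rw [if_neg h1] at h
      have post := ih ad bd hsubr hs hub hk hbk hnd hi hibd ad' bd' h
      refine ⟨post.sound', post.ub', post.keysN', post.bdKeys', post.nodup', post.mono,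
        post.sup, post.unchanged, post.ival, post.inot, ?_, post.phi⟩
      intro n' dc' hmem hle
      rcases List.mem_cons.mp hmem with h' | h'
      · obtain ⟨rfl, rfl⟩ := Prod.mk.injEq .. ▸ h'
        exact absurd hle h1
      · exact post.processed n' dc' h' hle


-- invariants of the initial dict {i1: 0}
lemma pvInit_sound (i1 i2 dmax : Int) (scl : List (Int × List (Int × Int))) :
    pvSound i1 i2 dmax scl (PySem.Dict.mk [(i1, 0)]) := by
  intro n dn h
  rw [PySem.Dict.get?_mk_cons] at h
  by_cases hn : i1 = n
  · rw [if_pos (by simp [hn])] at h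
    cases h
    exact hn ▸ pvPath.start
  · rw [if_neg (by simp [hn])] at h
    simp [PySem.Dict.get?] at h

lemma pvInit_ub (i1 dmax : Int) : pvUB dmax (PySem.Dict.mk [(i1, 0)]) := by
  intro n dn h
  rw [PySem.Dict.get?_mk_cons] at h
  by_cases hn : i1 = n
  · rw [if_pos (by simp [hn])] at h; cases h; simp
  · rw [if_neg (by simp [hn])] at h; simp [PySem.Dict.get?] at h

lemma pvInit_keysN (i1 : Int) (scl : List (Int × List (Int × Int))) :
    pvKeysN i1 scl (PySem.Dict.mk [(i1, 0)]) := by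
  intro n h
  rw [PySem.Dict.get?_mk_cons] at h
  by_cases hn : i1 = n
  · exact hn ▸ (by unfold pvNodes; rw [PySem.Set.mem_ofList]; exact List.mem_cons_self)
  · rw [if_neg (by simp [hn])] at h; simp [PySem.Dict.get?] at h

lemma pvInit_I1 (i1 : Int) : pvI1 i1 (PySem.Dict.mk [(i1, 0)]) :=
  ⟨0, by rw [PySem.Dict.get?_mk_cons, if_pos (by simp)], le_refl 0⟩


lemma pvLoopA_main (i1 i2 dmax : Int) (scl : List (Int × List (Int × Int))) (hW : pvW scl) :
    ∀ (fuel : Nat) (ad : PySem.Dict Int Int) (bd : List Int),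
    pvMeas i1 dmax scl ad bd < fuel →
    pvSound i1 i2 dmax scl ad → pvUB dmax ad → pvKeysN i1 scl ad → pvI1 i1 ad →
    (∀ n ∈ bd, (ad.get? n).isSome = true) → bd.Nodup →
    pvFixA i2 dmax scl ad bd →
    (pvLoopA i2 dmax (PySem.Dict.mk scl) fuel ad bd = true → pvHit i1 i2 dmax scl) ∧
    (pvLoopA i2 dmax (PySem.Dict.mk scl) fuel ad bd = false → ¬ pvHit i1 i2 dmax scl) := by
  intro fuel
  induction fuel with
  | zero => intro ad bd hm; omega
  | succ f ihf =>
    intro ad bd hm hs hub hk hI hbk hnd hfix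
    cases bd with
    | nil =>
      constructor
      · intro h; simp [pvLoopA] at h
      · intro _; exact pv_noHit_of_fixA i1 i2 dmax scl ad hI hfix
    | cons i rest =>
      obtain ⟨d, hi⟩ : ∃ d, ad.get? i = some d :=
        Option.isSome_iff_exists.mp (hbk i List.mem_cons_self)
      have hPd := hs i d hi
      have hd0 := pvPath_nonneg i1 i2 dmax scl hW hPd
      have hibd : i ∉ rest := (List.nodup_cons.mp hnd).1
      have hndr := (List.nodup_cons.mp hnd).2
      have hbkr : ∀ n ∈ rest, (ad.get? n).isSome = true :=
        fun n hn => hbk n (List.mem_cons_of_mem _ hn)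
      simp only [pvLoopA, hi, Option.getD_some]
      cases hrel : pvRelaxA i2 dmax d ((PySem.Dict.mk scl).getD i []) ad rest with
      | none =>
        constructor
        · intro _
          obtain ⟨dc, hmem, hle⟩ := pvRelaxA_none i2 dmax d _ ad rest hrel
          exact ⟨i, d, dc, hPd, hmem, hle⟩
        · intro h; simp at h
      | some p =>
        obtain ⟨ad', bd'⟩ := p
        have post := pvRelaxA_post i1 i2 dmax scl i d hW hd0 hPd
          ((PySem.Dict.mk scl).getD i []) ad rest (fun e he => he) hs hub hk hbkr hndr hi hibd
          ad' bd' hrel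
        have hI' : pvI1 i1 ad' := by
          obtain ⟨d0, h0, h0le⟩ := hI
          obtain ⟨d0', h0', h0le'⟩ := post.mono i1 d0 h0
          exact ⟨d0', h0', by omega⟩
        have hfix' : pvFixA i2 dmax scl ad' bd' := by
          intro u du hdu hubd n dc he hle
          by_cases hui : u = i
          · subst hui
            rw [post.ival] at hdu
            cases hdu
            exact post.processed n dc he hle
          · have hur : u ∉ rest := fun hh => hubd (post.sup u hh)
            have hold : ad.get? u = some du := by rw [← post.unchanged u hubd]; exact hdu
            obtain ⟨hne, dv, hv, hvle⟩ := hfix u du hold (by simp [hui, hur]) n dc he hle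
            obtain ⟨dv', hv', hle'⟩ := post.mono n dv hv
            exact ⟨hne, dv', hv', by omega⟩
        have hmeas' : pvMeas i1 dmax scl ad' bd' < pvMeas i1 dmax scl ad (i :: rest) := by
          rcases post.phi with ⟨heq, heqb⟩ | hphi
          · subst heq; subst heqb
            unfold pvMeas
            simp only [List.length_cons]
            omega
          · have hsubN : bd' ⊆ pvNodes i1 scl := fun m hmbd =>
              post.keysN' m (post.bdKeys' m hmbd)
            have hlen : bd'.length ≤ (pvNodes i1 scl).length :=
              (List.subperm_of_subset post.nodup' hsubN).length_le
            have h1 : pvPhi i1 dmax scl ad' + 1 ≤ pvPhi i1 dmax scl ad := hphi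
            have h2 := Nat.mul_le_mul_right ((pvNodes i1 scl).length + 2) h1
            rw [Nat.add_mul, one_mul] at h2
            unfold pvMeas
            simp only [List.length_cons]
            omega
        exact ihf ad' bd' (by omega) post.sound' post.ub' post.keysN' hI'
          post.bdKeys' post.nodup' hfix'

lemma pv_shortA_iff (i1 i2 dmax : Int) (scl : List (Int × List (Int × Int))) (hW : pvW scl) :
    short_connection i1 i2 dmax scl = true ↔ pvHit i1 i2 dmax scl := by
  have hub0 := pvInit_ub i1 dmax
  have hbk0 : ∀ n ∈ [i1], ((PySem.Dict.mk [(i1, (0:Int))]).get? n).isSome = true := by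
    intro n hn
    simp at hn
    rw [hn, PySem.Dict.get?_mk_cons, if_pos (by simp)]
    rfl
  have hfix0 : pvFixA i2 dmax scl (PySem.Dict.mk [(i1, 0)]) [i1] := by
    intro u du hdu hubd n dc he hle
    exfalso
    apply hubd
    rw [PySem.Dict.get?_mk_cons] at hdu
    by_cases hn : i1 = u
    · simp [hn]
    · rw [if_neg (by simp [hn])] at hdu; simp [PySem.Dict.get?] at hdu
  have hK1 : 1 ≤ (pvNodes i1 scl).length := by
    have : i1 ∈ pvNodes i1 scl := by
      unfold pvNodes; rw [PySem.Set.mem_ofList]; exact List.mem_cons_self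
    exact List.length_pos_of_mem this
  have hmeas : pvMeas i1 dmax scl (PySem.Dict.mk [(i1, 0)]) [i1] < pvFuelA i1 dmax scl := by
    have hphi := pvPhi_le i1 dmax scl (PySem.Dict.mk [(i1, 0)]) hub0
    unfold pvMeas pvFuelA
    simp only [List.length_cons, List.length_nil]
    have h2 := Nat.mul_le_mul_right ((pvNodes i1 scl).length + 2) hphi
    omega
  have hmain := pvLoopA_main i1 i2 dmax scl hW (pvFuelA i1 dmax scl)
    (PySem.Dict.mk [(i1, 0)]) [i1] hmeas (pvInit_sound i1 i2 dmax scl) hub0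
    (pvInit_keysN i1 scl) (pvInit_I1 i1) hbk0 (by simp) hfix0
  unfold short_connection
  constructor
  · exact hmain.1
  · intro hHit
    cases hres : pvLoopA i2 dmax (PySem.Dict.mk scl) (pvFuelA i1 dmax scl)
        (PySem.Dict.mk [(i1, 0)]) [i1] with
    | true => rfl
    | false => exact absurd hHit (hmain.2 hres)


lemma pvRelaxB_true (i2 dmax du : Int) :
    ∀ (edges : List (Int × Int)) (dist : PySem.Dict Int Int),
    (pvRelaxB i2 dmax du edges dist true).2 = true := by
  intro edges
  induction edges with
  | nil => intro dist; rfl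
  | cons e rest ih =>
    intro dist
    obtain ⟨n, dc⟩ := e
    simp only [pvRelaxB]
    cases hupd : (if n ≠ i2 ∧ du + dc ≤ dmax then
        (match dist.get? n with
          | none => true
          | some dv => decide (du + dc < dv))
      else false) with
    | true => rw [if_pos rfl]; exact ih _
    | false => rw [if_neg (by simp)]; exact ih _

lemma pvSweepB_true (i2 dmax : Int) (sc : PySem.Dict Int (List (Int × Int))) :
    ∀ (keys : List Int) (dist : PySem.Dict Int Int),
    (pvSweepB i2 dmax sc keys dist true).2 = true := by
  intro keys
  induction keys with
  | nil => intro dist; rfl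
  | cons u rest ih =>
    intro dist
    simp only [pvSweepB]
    cases hg : dist.get? u with
    | none => exact ih _
    | some du =>
      have h2 := pvRelaxB_true i2 dmax du (sc.getD u []) dist
      cases hrel : pvRelaxB i2 dmax du (sc.getD u []) dist true with
      | mk d1 c1 =>
        rw [hrel] at h2
        simp only [hrel]
        cases c1
        · simp at h2
        · exact ih _

structure pvPostB (i1 i2 dmax : Int) (scl : List (Int × List (Int × Int)))
    (dist dist' : PySem.Dict Int Int) (ch ch' : Bool) : Prop where
  sound' : pvSound i1 i2 dmax scl dist'
  ub' : pvUB dmax dist'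
  keysN' : pvKeysN i1 scl dist'
  mono : ∀ m dm, dist.get? m = some dm → ∃ dm', dist'.get? m = some dm' ∧ dm' ≤ dm
  phi : (dist' = dist ∧ ch' = ch) ∨ pvPhi i1 dmax scl dist' < pvPhi i1 dmax scl dist

lemma pvRelaxB_post (i1 i2 dmax : Int) (scl : List (Int × List (Int × Int))) (u du : Int)
    (hW : pvW scl) (hd0 : 0 ≤ du) (hPd : pvPath i1 i2 dmax scl u du) :
    ∀ (edges : List (Int × Int)) (dist : PySem.Dict Int Int) (ch : Bool),
    (∀ e ∈ edges, e ∈ pvE scl u) →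
    pvSound i1 i2 dmax scl dist → pvUB dmax dist → pvKeysN i1 scl dist →
    ∀ dist' ch', pvRelaxB i2 dmax du edges dist ch = (dist', ch') →
    pvPostB i1 i2 dmax scl dist dist' ch ch' := by
  intro edges
  induction edges with
  | nil =>
    intro dist ch _ hs hub hk dist' ch' h
    simp only [pvRelaxB, Prod.mk.injEq] at h
    obtain ⟨rfl, rfl⟩ := h
    exact ⟨hs, hub, hk, fun m dm hm => ⟨dm, hm, le_refl _⟩, Or.inl ⟨rfl, rfl⟩⟩
  | cons e rest ih =>
    intro dist ch hsub hs hub hk dist' ch' h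
    obtain ⟨n, dc⟩ := e
    have hedge : (n, dc) ∈ pvE scl u := hsub _ List.mem_cons_self
    have hdc : (0:Int) ≤ dc := by have := hW u (n, dc) hedge; simpa using this
    have hsubr : ∀ e ∈ rest, e ∈ pvE scl u := fun e he => hsub e (List.mem_cons_of_mem _ he)
    simp only [pvRelaxB] at h
    by_cases hc : n ≠ i2 ∧ du + dc ≤ dmax
    · rw [if_pos hc] at h
      cases hupd : (match dist.get? n with
          | none => true
          | some dv => decide (du + dc < dv)) with
      | false =>
        rw [if_neg (by simp [hupd])] at h
        exact ih dist ch hsubr hs hub hk dist' ch' h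
      | true =>
        rw [if_pos hupd] at h
        have hlt : du + dc < (dist.get? n).getD (max dmax 0 + 1) := by
          cases hg : dist.get? n with
          | none => simp only [Option.getD_none]; omega
          | some dv => rw [hg] at hupd; simp at hupd; simpa using hupd
        have hs2 : pvSound i1 i2 dmax scl (dist.insert n (du + dc)) := by
          intro m dm hm
          rw [PySem.Dict.get?_insert] at hm
          by_cases hmn : m = n
          · rw [if_pos hmn] at hm
            cases hm
            exact hmn ▸ pvPath.step hPd hedge hc.1 hc.2
          · rw [if_neg hmn] at hm; exact hs m dm hm
        have hub2 : pvUB dmax (dist.insert n (du + dc)) := by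
          intro m dm hm
          rw [PySem.Dict.get?_insert] at hm
          by_cases hmn : m = n
          · rw [if_pos hmn] at hm; cases hm; have := hc.2; omega
          · rw [if_neg hmn] at hm; exact hub m dm hm
        have hk2 : pvKeysN i1 scl (dist.insert n (du + dc)) := by
          intro m hm
          rw [PySem.Dict.get?_insert] at hm
          by_cases hmn : m = n
          · exact hmn ▸ pv_target_mem_nodes i1 scl u n dc hedge
          · rw [if_neg hmn] at hm; exact hk m hm
        have post := ih (dist.insert n (du + dc)) true hsubr hs2 hub2 hk2 dist' ch' h
        have hphi2 : pvPhi i1 dmax scl (dist.insert n (du + dc)) < pvPhi i1 dmax scl dist :=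
          pv_phi_insert_lt i1 dmax scl dist n (du + dc)
            (pv_target_mem_nodes i1 scl u n dc hedge) (by omega) hlt
        refine ⟨post.sound', post.ub', post.keysN', ?_, ?_⟩
        · intro m dm hm
          by_cases hmn : m = n
          · subst hmn
            have hdm : du + dc < dm := by rw [hm] at hlt; simpa using hlt
            obtain ⟨dm', hm', hle'⟩ := post.mono m (du + dc)
              (by rw [PySem.Dict.get?_insert, if_pos rfl])
            exact ⟨dm', hm', by omega⟩
          · exact post.mono m dm (by rw [PySem.Dict.get?_insert, if_neg hmn]; exact hm)
        · right
          rcases post.phi with ⟨heq, _⟩ | hlt'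
          · rw [heq]; exact hphi2
          · omega
    · rw [if_neg (by simp [if_neg hc])] at h
      exact ih dist ch hsubr hs hub hk dist' ch' h

lemma pvRelaxB_nochange (i2 dmax du : Int) :
    ∀ (edges : List (Int × Int)) (dist : PySem.Dict Int Int) (ch : Bool)
      (dist' : PySem.Dict Int Int),
    pvRelaxB i2 dmax du edges dist ch = (dist', false) →
    ch = false ∧ dist' = dist ∧
      (∀ n dc, (n, dc) ∈ edges → n ≠ i2 → du + dc ≤ dmax →
        ∃ dv, dist.get? n = some dv ∧ dv ≤ du + dc) := by
  intro edges
  induction edges with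
  | nil =>
    intro dist ch dist' h
    simp only [pvRelaxB, Prod.mk.injEq] at h
    exact ⟨h.2, h.1.symm, by simp⟩
  | cons e rest ih =>
    intro dist ch dist' h
    obtain ⟨n, dc⟩ := e
    simp only [pvRelaxB] at h
    cases hupd : (if n ≠ i2 ∧ du + dc ≤ dmax then
        (match dist.get? n with
          | none => true
          | some dv => decide (du + dc < dv))
      else false) with
    | true =>
      rw [if_pos hupd] at h
      have := pvRelaxB_true i2 dmax du rest (dist.insert n (du + dc))
      rw [h] at this
      simp at this
    | false =>
      rw [if_neg (by simp [hupd])] at h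
      obtain ⟨hch, hdd, hprop⟩ := ih dist ch dist' h
      refine ⟨hch, hdd, ?_⟩
      intro n' dc' hmem hne hle
      rcases List.mem_cons.mp hmem with h' | h'
      · obtain ⟨rfl, rfl⟩ := Prod.mk.injEq .. ▸ h'
        rw [if_pos ⟨hne, hle⟩] at hupd
        cases hg : dist.get? n' with
        | none => rw [hg] at hupd; simp at hupd
        | some dv =>
          rw [hg] at hupd
          have : dv ≤ du + dc' := by simpa using hupd
          exact ⟨dv, rfl, this⟩
      · exact hprop n' dc' h' hne hle

lemma pvSweepB_post (i1 i2 dmax : Int) (scl : List (Int × List (Int × Int))) (hW : pvW scl) :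
    ∀ (keys : List Int) (dist : PySem.Dict Int Int) (ch : Bool),
    pvSound i1 i2 dmax scl dist → pvUB dmax dist → pvKeysN i1 scl dist →
    ∀ dist' ch', pvSweepB i2 dmax (PySem.Dict.mk scl) keys dist ch = (dist', ch') →
    pvPostB i1 i2 dmax scl dist dist' ch ch' := by
  intro keys
  induction keys with
  | nil =>
    intro dist ch hs hub hk dist' ch' h
    simp only [pvSweepB, Prod.mk.injEq] at h
    obtain ⟨rfl, rfl⟩ := h
    exact ⟨hs, hub, hk, fun m dm hm => ⟨dm, hm, le_refl _⟩, Or.inl ⟨rfl, rfl⟩⟩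
  | cons u rest ih =>
    intro dist ch hs hub hk dist' ch' h
    simp only [pvSweepB] at h
    cases hg : dist.get? u with
    | none =>
      simp only [hg] at h
      exact ih dist ch hs hub hk dist' ch' h
    | some du =>
      simp only [hg] at h
      have hPd := hs u du hg
      have hd0 := pvPath_nonneg i1 i2 dmax scl hW hPd
      cases hrel : pvRelaxB i2 dmax du ((PySem.Dict.mk scl).getD u []) dist ch with
      | mk d1 c1 =>
        simp only [hrel] at h
        have post1 := pvRelaxB_post i1 i2 dmax scl u du hW hd0 hPd
          ((PySem.Dict.mk scl).getD u []) dist ch (fun e he => he) hs hub hk d1 c1 hrel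
        have post2 := ih d1 c1 post1.sound' post1.ub' post1.keysN' dist' ch' h
        refine ⟨post2.sound', post2.ub', post2.keysN', ?_, ?_⟩
        · intro m dm hm
          obtain ⟨dm1, hm1, hle1⟩ := post1.mono m dm hm
          obtain ⟨dm2, hm2, hle2⟩ := post2.mono m dm1 hm1
          exact ⟨dm2, hm2, by omega⟩
        · rcases post1.phi with ⟨heq1, hceq1⟩ | hlt1
          · rcases post2.phi with ⟨heq2, hceq2⟩ | hlt2
            · exact Or.inl ⟨by rw [heq2, heq1], by rw [hceq2, hceq1]⟩
            · right; rw [heq1] at hlt2; exact hlt2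
          · rcases post2.phi with ⟨heq2, _⟩ | hlt2
            · right; rw [heq2]; exact hlt1
            · right; omega

lemma pvSweepB_nochange (i1 i2 dmax : Int) (scl : List (Int × List (Int × Int))) :
    ∀ (keys : List Int) (dist dist' : PySem.Dict Int Int),
    pvSweepB i2 dmax (PySem.Dict.mk scl) keys dist false = (dist', false) →
    dist' = dist ∧
      (∀ u ∈ keys, ∀ du, dist.get? u = some du →
        ∀ n dc, (n, dc) ∈ pvE scl u → n ≠ i2 → du + dc ≤ dmax →
          ∃ dv, dist.get? n = some dv ∧ dv ≤ du + dc) := by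
  intro keys
  induction keys with
  | nil =>
    intro dist dist' h
    simp only [pvSweepB, Prod.mk.injEq] at h
    exact ⟨h.1.symm, by simp⟩
  | cons u rest ih =>
    intro dist dist' h
    simp only [pvSweepB] at h
    cases hg : dist.get? u with
    | none =>
      simp only [hg] at h
      obtain ⟨hdd, hprop⟩ := ih dist dist' h
      refine ⟨hdd, ?_⟩
      intro u' hu' du hdu n dc he hne hle
      rcases List.mem_cons.mp hu' with h' | h'
      · subst h'; rw [hg] at hdu; cases hdu
      · exact hprop u' h' du hdu n dc he hne hle
    | some du =>
      simp only [hg] at h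
      cases hrel : pvRelaxB i2 dmax du ((PySem.Dict.mk scl).getD u []) dist false with
      | mk d1 c1 =>
        simp only [hrel] at h
        cases c1 with
        | true =>
          have := pvSweepB_true i2 dmax (PySem.Dict.mk scl) rest d1
          rw [h] at this
          simp at this
        | false =>
          obtain ⟨_, hdd1, hprop1⟩ := pvRelaxB_nochange i2 dmax du _ dist false d1 hrel
          rw [hdd1] at h
          obtain ⟨hdd2, hprop2⟩ := ih dist dist' h
          refine ⟨hdd2, ?_⟩
          intro u' hu' du' hdu' n dc he hne hle
          rcases List.mem_cons.mp hu' with h' | h'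
          · subst h'
            rw [hg] at hdu'
            cases hdu'
            exact hprop1 n dc he hne hle
          · exact hprop2 u' h' du' hdu' n dc he hne hle

lemma pvSweepsB_main (i1 i2 dmax : Int) (scl : List (Int × List (Int × Int))) (hW : pvW scl) :
    ∀ (fuel : Nat) (dist : PySem.Dict Int Int),
    pvPhi i1 dmax scl dist < fuel →
    pvSound i1 i2 dmax scl dist → pvUB dmax dist → pvKeysN i1 scl dist → pvI1 i1 dist →
    pvSound i1 i2 dmax scl (pvSweepsB i2 dmax (PySem.Dict.mk scl) (scl.map Prod.fst) fuel dist) ∧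
    pvI1 i1 (pvSweepsB i2 dmax (PySem.Dict.mk scl) (scl.map Prod.fst) fuel dist) ∧
    pvFixW i2 dmax scl (pvSweepsB i2 dmax (PySem.Dict.mk scl) (scl.map Prod.fst) fuel dist) := by
  intro fuel
  induction fuel with
  | zero => intro dist hphi; omega
  | succ f ihf =>
    intro dist hphi hs hub hk hI
    simp only [pvSweepsB]
    cases hsw : pvSweepB i2 dmax (PySem.Dict.mk scl) (scl.map Prod.fst) dist false with
    | mk d1 c1 =>
      have post := pvSweepB_post i1 i2 dmax scl hW (scl.map Prod.fst) dist false hs hub hk d1 c1 hsw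
      cases c1 with
      | true =>
        simp only [if_pos]
        have hlt : pvPhi i1 dmax scl d1 < pvPhi i1 dmax scl dist := by
          rcases post.phi with ⟨_, hc⟩ | h'
          · simp at hc
          · exact h'
        have hI1 : pvI1 i1 d1 := by
          obtain ⟨d0, h0, h0le⟩ := hI
          obtain ⟨d0', h0', h0le'⟩ := post.mono i1 d0 h0
          exact ⟨d0', h0', by omega⟩
        exact ihf d1 (by omega) post.sound' post.ub' post.keysN' hI1
      | false =>
        rw [if_neg (by simp)]
        obtain ⟨hdd, hprop⟩ := pvSweepB_nochange i1 i2 dmax scl (scl.map Prod.fst) dist d1 hsw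
        subst hdd
        refine ⟨hs, hI, ?_⟩
        intro u du hdu n dc he hne hle
        exact hprop u (pv_src_mem_keys scl u n dc he) du hdu n dc he hne hle

lemma pv_shortB_iff (i1 i2 dmax : Int) (scl : List (Int × List (Int × Int))) (hW : pvW scl) :
    short_connection_alt i1 i2 dmax scl = true ↔ pvHit i1 i2 dmax scl := by
  have hphi0 : pvPhi i1 dmax scl (PySem.Dict.mk [(i1, 0)]) < pvFuelB i1 dmax scl := by
    have h1 := pvPhi_le i1 dmax scl (PySem.Dict.mk [(i1, 0)]) (pvInit_ub i1 dmax)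
    have hK : (pvNodes i1 scl).length ≤ 1 + (scl.flatMap (fun p => p.2.map Prod.fst)).length := by
      have := PySem.Set.length_ofList_le (i1 :: scl.flatMap (fun p => p.2.map Prod.fst))
      rw [List.length_cons] at this
      simp only [pvNodes]
      omega
    have h2 := Nat.mul_le_mul_right ((max dmax 0).toNat + 1) hK
    unfold pvFuelB
    omega
  obtain ⟨hsoundR, hI1R, hfixR⟩ := pvSweepsB_main i1 i2 dmax scl hW (pvFuelB i1 dmax scl)
    (PySem.Dict.mk [(i1, 0)]) hphi0 (pvInit_sound i1 i2 dmax scl) (pvInit_ub i1 dmax)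
    (pvInit_keysN i1 scl) (pvInit_I1 i1)
  unfold short_connection_alt
  constructor
  · intro h
    obtain ⟨u, hu, hinner⟩ := List.any_eq_true.mp h
    obtain ⟨e, he, hcond⟩ := List.any_eq_true.mp hinner
    obtain ⟨e1, e2⟩ := e
    simp only [Bool.and_eq_true] at hcond
    obtain ⟨hbeq, hrest⟩ := hcond
    have he1 : e1 = i2 := by simpa using hbeq
    cases hg : (pvSweepsB i2 dmax (PySem.Dict.mk scl) (scl.map Prod.fst)
        (pvFuelB i1 dmax scl) (PySem.Dict.mk [(i1, 0)])).get? u with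
    | none => rw [hg] at hrest; simp at hrest
    | some du =>
      rw [hg] at hrest
      have hle : du + e2 ≤ dmax := by simpa using hrest
      exact ⟨u, du, e2, hsoundR u du hg, by rwa [he1] at he, hle⟩
  · rintro ⟨u, d, dc, hp, he, hle⟩
    obtain ⟨du, hdu, hdule⟩ := pv_dominate i1 i2 dmax scl _ hI1R hfixR hp
    apply List.any_eq_true.mpr
    refine ⟨u, pv_src_mem_keys scl u i2 dc he, ?_⟩
    apply List.any_eq_true.mpr
    refine ⟨(i2, dc), he, ?_⟩
    rw [hdu]
    simp only [beq_self_eq_true, Bool.true_and]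
    simp only [decide_eq_true_eq]
    omega

-- ===== VERDICT (by name: the statement is the Claim_ definition above) =====
theorem short_connection_spec : Claim_equal_short_connection := by
  intro i1 i2 dmax scl _ hPre
  unfold Spec_short_connection
  have hW := pvW_of_pre i1 i2 dmax scl hPre
  rw [Bool.eq_iff_iff, pv_shortA_iff i1 i2 dmax scl hW, pv_shortB_iff i1 i2 dmax scl hW]
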